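-- pv_equiv track=rewrite | github.com/Kazun1998/library_for_python | Math.py | Find_Range_Sum
-- ===== SOURCE A (Python) =====
-- def Find_Range_Sum(Range,S):
--     """Range=[(A_0,B_0),...,(A_{N-1}, B_{N-1})] としとたき,
--     A_i<=X_i<=B_i, X_0+...+X_{n-1}=S を満たす組の例を1つ求める.
--
--     A_i<=B_i
--     """
--
--     alpha=beta=0
--     for a,b in Range:
--         alpha+=a
--         beta +=b
--
--     if not (alpha<=S<=beta): return None
--
--     N=len(Range)
--     X=[a for a,_ in Range]
--     remain=S-sum(X)
--     for i in range(N):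
--         y=min(Range[i][1],X[i]+remain)
--         remain-=y-X[i]
--         X[i]=y
--     return X
-- ===== SOURCE B (Python) =====
-- def Find_Range_Sum(Range, S):
--     A = [a for a, _ in Range]
--     B = [b for _, b in Range]
--     alpha = sum(A)
--     beta = sum(B)
--     if not (alpha <= S <= beta):
--         return None
--     remain = S - alpha
--     # cumulative slack capacities: C[i] = (b_0-a_0)+...+(b_i-a_i)
--     C = []
--     t = 0
--     for a, b in Range:
--         t += b - a
--         C.append(t)
--     # binary search for the least cutoff j with C[j] >= remain
--     lo, hi = 0, len(C)
--     while lo < hi: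
--         mid = (lo + hi) // 2
--         if C[mid] >= remain:
--             hi = mid
--         else:
--             lo = mid + 1
--     j = lo
--     if j == len(Range):
--         return A            # only reachable for Range == []
--     prev = C[j - 1] if j > 0 else 0
--     return B[:j] + [A[j] + (remain - prev)] + A[j + 1:]
-- ===== Notes on version B (the rewrite author's own statement) =====
-- stated objective: alternative
-- what changed: Replaces the greedy per-element clamping loop by three stages: build the cumulative-slack table C once, binary-search the least cutoff index j with C[j] >= S-alpha, and assemble the answer by list slicing (b_i before j, one partial element at j, a_i after); Pre_ excludes only malformed ranges (some a_i > b_i) that pass the feasibility test, where A's clamping artefacts are not the documented function.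
-- outside the precondition, e.g. on Find_Range_Sum([(0, 5), (3, 0)], 4): A returns [1, 0], B returns [1, 3]
import Mathlib
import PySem

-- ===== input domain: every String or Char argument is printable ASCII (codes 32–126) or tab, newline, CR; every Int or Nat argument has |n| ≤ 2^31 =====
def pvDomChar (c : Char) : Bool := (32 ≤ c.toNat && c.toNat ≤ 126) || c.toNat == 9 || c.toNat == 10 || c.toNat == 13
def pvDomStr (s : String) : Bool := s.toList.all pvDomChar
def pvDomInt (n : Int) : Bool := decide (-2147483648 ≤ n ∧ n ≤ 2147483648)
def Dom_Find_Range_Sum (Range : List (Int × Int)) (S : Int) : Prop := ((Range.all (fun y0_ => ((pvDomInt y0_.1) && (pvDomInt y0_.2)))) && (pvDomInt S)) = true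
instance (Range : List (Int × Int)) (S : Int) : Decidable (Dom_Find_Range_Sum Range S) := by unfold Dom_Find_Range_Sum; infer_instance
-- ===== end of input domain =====

-- B replaces A's greedy clamping loop by a cumulative-slack table, a binary search for the
-- cutoff index and slice assembly; Pre_ restricts to the documented domain a_i <= b_i.


-- ===== PORT A =====
def Find_Range_Sum (Range : List (Int × Int)) (S : Int) : Option (List Int) :=
  let ab := Range.foldl (fun (p : Int × Int) x => (p.1 + x.1, p.2 + x.2)) (0, 0)
  if ab.1 ≤ S ∧ S ≤ ab.2 then
    let N : Int := Range.length
    let X0 : List Int := Range.map (fun x => x.1)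
    let remain0 := S - X0.sum
    -- every index i produced by range(N) is in bounds, so pyGetD/pySetD are exact here
    let fin := (PySem.List.pyRange 0 N 1).foldl
      (fun (st : List Int × Int) i =>
        let Xi := PySem.List.pyGetD st.1 i 0
        let y := min (PySem.List.pyGetD Range i ((0 : Int), (0 : Int))).2 (Xi + st.2)
        (PySem.List.pySetD st.1 i y, st.2 - (y - Xi)))
      (X0, remain0)
    some fin.1
  else none

-- ===== PORT B =====
-- the while-loop binary search of Source B (lo, hi naturals; C[mid] is always in range in Python);
-- the loop is ported with a fuel argument that bounds the iteration count (hi - lo shrinks each step)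
def bsB (C : List Int) (remain : Int) : Nat → Nat → Nat → Nat
  | 0, lo, _ => lo
  | n + 1, lo, hi =>
    if lo < hi then
      let mid := (lo + hi) / 2
      if remain ≤ C.getD mid 0 then bsB C remain n lo mid else bsB C remain n (mid + 1) hi
    else lo

def Find_Range_Sum_alt (Range : List (Int × Int)) (S : Int) : Option (List Int) :=
  let A := Range.map (fun x => x.1)
  let B := Range.map (fun x => x.2)
  let alpha := A.sum
  let beta := B.sum
  if alpha ≤ S ∧ S ≤ beta then
    let remain := S - alpha
    let C := (Range.foldl (fun (st : List Int × Int) x =>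
      (st.1 ++ [st.2 + (x.2 - x.1)], st.2 + (x.2 - x.1))) (([] : List Int), (0 : Int))).1
    let j := bsB C remain C.length 0 C.length
    if j = Range.length then some A
    else
      let prev := if 0 < j then C.getD (j - 1) 0 else 0
      some (B.take j ++ [A.getD j 0 + (remain - prev)] ++ A.drop (j + 1))
  else none

-- ===== PRECONDITION & SPEC =====
-- Pre_ excludes malformed ranges (some a_i > b_i, though the docstring requires A_i<=B_i) whose
-- feasibility test sum(a) <= S <= sum(b) still passes; A's value there is an artefact of its
-- clamping loop.  When the feasibility test fails both programs return None, so those inputs stay in.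
def Pre_Find_Range_Sum (Range : List (Int × Int)) (S : Int) : Prop :=
  ((Range.map (fun x => x.1)).sum ≤ S ∧ S ≤ (Range.map (fun x => x.2)).sum) →
    ∀ p ∈ Range, p.1 ≤ p.2
instance (Range : List (Int × Int)) (S : Int) : Decidable (Pre_Find_Range_Sum Range S) := by unfold Pre_Find_Range_Sum; infer_instance

def pvWitness_Find_Range_Sum : (List (Int × Int)) × Int := ([(0, 2), (1, 4), (2, 2)], 6)

def Spec_Find_Range_Sum (Range : List (Int × Int)) (S : Int) (out : Option (List Int)) : Prop := out = Find_Range_Sum_alt Range S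
instance (Range : List (Int × Int)) (S : Int) (out : Option (List Int)) : Decidable (Spec_Find_Range_Sum Range S out) := by unfold Spec_Find_Range_Sum; infer_instance

-- ===== CLAIM (what is proved, stated in full; the proofs are below) =====
def Claim_equal_Find_Range_Sum : Prop := ∀ (Range : List (Int × Int)) (S : Int), Dom_Find_Range_Sum Range S → Pre_Find_Range_Sum Range S → Spec_Find_Range_Sum Range S (Find_Range_Sum Range S)

-- ===== LEMMAS AND PROOFS =====

-- structural form of A's indexed mutation loop
def loopA : List (Int × Int) → Int → List Int × Int
  | [], r => ([], r)
  | x :: t, r =>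
    let y := min x.2 (x.1 + r)
    let p := loopA t (r - (y - x.1))
    (y :: p.1, p.2)

-- recursive form of the greedy result on the documented domain
def buildAt : List (Int × Int) → Int → List Int
  | [], _ => []
  | x :: t, r =>
    if r ≤ x.2 - x.1 then (x.1 + r) :: t.map (fun p => p.1)
    else x.2 :: buildAt t (r - (x.2 - x.1))

-- structural form of B's prefix-capacity table
def prefC : List (Int × Int) → Int → List Int
  | [], _ => []
  | x :: l, t => (t + (x.2 - x.1)) :: prefC l (t + (x.2 - x.1))

def sumsl (l : List (Int × Int)) : Int := (l.map (fun p => p.2 - p.1)).sum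

lemma sumsl_append (a b : List (Int × Int)) : sumsl (a ++ b) = sumsl a + sumsl b := by
  simp [sumsl]

lemma set_append_len (done rest : List Int) (z y : Int) :
    (done ++ z :: rest).set done.length y = (done ++ [y]) ++ rest := by
  induction done with
  | nil => simp
  | cons a d ih => simp [ih]

lemma A_loop (Rsuf : List (Int × Int)) : ∀ (Rpre : List (Int × Int)) (done : List Int) (r : Int),
    done.length = Rpre.length →
    (PySem.List.pyRange (Rpre.length : Int) (((Rpre ++ Rsuf).length : Nat) : Int) 1).foldl
      (fun (st : List Int × Int) i =>
        let Xi := PySem.List.pyGetD st.1 i 0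
        let y := min (PySem.List.pyGetD (Rpre ++ Rsuf) i ((0 : Int), (0 : Int))).2 (Xi + st.2)
        (PySem.List.pySetD st.1 i y, st.2 - (y - Xi)))
      (done ++ Rsuf.map (fun x => x.1), r)
    = (done ++ (loopA Rsuf r).1, (loopA Rsuf r).2) := by
  induction Rsuf with
  | nil =>
    intro Rpre done r h
    rw [PySem.List.pyRange_one_eq_nil (by simp)]
    simp [loopA]
  | cons x t ih =>
    intro Rpre done r h
    have hlt : (Rpre.length : Int) < (((Rpre ++ x :: t).length : Nat) : Int) := by
      simp
    rw [PySem.List.pyRange_one_cons hlt, List.foldl_cons]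
    have hget1 : PySem.List.pyGetD (done ++ x.1 :: t.map (fun x => x.1)) (Rpre.length : Int) 0 = x.1 := by
      rw [← h, PySem.List.pyGetD_natCast]
      simp [List.getD]
    have hget2 : PySem.List.pyGetD (Rpre ++ x :: t) (Rpre.length : Int) ((0:Int),(0:Int)) = x := by
      rw [PySem.List.pyGetD_natCast]
      simp [List.getD]
    have hset : ∀ y : Int, PySem.List.pySetD (done ++ x.1 :: t.map (fun x => x.1)) (Rpre.length : Int) y
        = (done ++ [y]) ++ t.map (fun x => x.1) := by
      intro y
      rw [← h, PySem.List.pySetD_natCast]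
      exact set_append_len _ _ _ _
    simp only [List.map_cons, hget1, hget2, hset]
    have hre : (Rpre.length : Int) + 1 = (((Rpre ++ [x]).length : Nat) : Int) := by simp
    have happ : Rpre ++ x :: t = (Rpre ++ [x]) ++ t := by simp
    rw [hre, happ]
    rw [ih (Rpre ++ [x]) (done ++ [min x.2 (x.1 + r)]) (r - (min x.2 (x.1 + r) - x.1)) (by simp [h])]
    simp [loopA]

lemma foldl_sum_pair (l : List (Int × Int)) :
    l.foldl (fun (p : Int × Int) x => (p.1 + x.1, p.2 + x.2)) (0, 0)
    = ((l.map (fun x => x.1)).sum, (l.map (fun x => x.2)).sum) := by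
  rw [PySem.List.foldl_prod_mk (f := fun acc (x : Int × Int) => acc + x.1)
      (g := fun acc (x : Int × Int) => acc + x.2)]
  rw [PySem.List.foldl_add, PySem.List.foldl_add]
  simp

lemma loopA_zero (l : List (Int × Int)) (hab : ∀ p ∈ l, p.1 ≤ p.2) :
    loopA l 0 = (l.map (fun p => p.1), 0) := by
  induction l with
  | nil => rfl
  | cons x t ih =>
    have hx : x.1 ≤ x.2 := hab x (by simp)
    have hy : min x.2 (x.1 + 0) = x.1 := by omega
    simp only [loopA, hy]
    rw [show x.1 - x.1 = 0 by ring] at *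
    simp [ih (fun p hp => hab p (by simp [hp]))]

lemma loopA_build (l : List (Int × Int)) : ∀ r : Int, (∀ p ∈ l, p.1 ≤ p.2) → 0 ≤ r →
    (loopA l r).1 = buildAt l r := by
  induction l with
  | nil => intro r _ _; rfl
  | cons x t ih =>
    intro r hab hr
    have hx : x.1 ≤ x.2 := hab x (by simp)
    have htab : ∀ p ∈ t, p.1 ≤ p.2 := fun p hp => hab p (by simp [hp])
    by_cases hc : r ≤ x.2 - x.1
    · have hy : min x.2 (x.1 + r) = x.1 + r := by omega
      simp only [loopA, buildAt, hy, if_pos hc]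
      rw [show r - (x.1 + r - x.1) = 0 by ring, loopA_zero t htab]
    · have hy : min x.2 (x.1 + r) = x.2 := by omega
      simp only [loopA, buildAt, hy, if_neg hc]
      exact congrArg (fun L => x.2 :: L) (ih (r - (x.2 - x.1)) htab (by omega))

lemma prefC_length (l : List (Int × Int)) : ∀ t, (prefC l t).length = l.length := by
  induction l with
  | nil => intro t; rfl
  | cons x l ih => intro t; simp [prefC, ih]

lemma prefC_getD (l : List (Int × Int)) : ∀ (t : Int) (k : Nat), k < l.length →
    (prefC l t).getD k 0 = t + sumsl (l.take (k + 1)) := by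
  induction l with
  | nil => intro t k h; simp at h
  | cons x l ih =>
    intro t k h
    cases k with
    | zero => simp [prefC, sumsl]
    | succ k =>
      simp only [prefC, List.getD_cons_succ]
      rw [ih (t + (x.2 - x.1)) k (by simpa using h)]
      simp [sumsl]
      ring

lemma sumsl_take_mono (l : List (Int × Int)) (hab : ∀ p ∈ l, p.1 ≤ p.2) {m n : Nat} (h : m ≤ n) :
    sumsl (l.take m) ≤ sumsl (l.take n) := by
  have hsplit : l.take n = l.take m ++ (l.take n).drop m := by
    conv_lhs => rw [← List.take_append_drop m (l.take n)]
    rw [List.take_take, Nat.min_eq_left h]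
  rw [hsplit, sumsl_append]
  have hnn : 0 ≤ sumsl ((l.take n).drop m) := by
    apply List.sum_nonneg
    intro x hx
    simp only [List.mem_map] at hx
    obtain ⟨p, hp, rfl⟩ := hx
    have : p ∈ l := List.mem_of_mem_take (List.mem_of_mem_drop hp)
    have := hab p this
    omega
  omega

lemma sumsl_eq (l : List (Int × Int)) :
    sumsl l = (l.map (fun x => x.2)).sum - (l.map (fun x => x.1)).sum := by
  induction l with
  | nil => rfl
  | cons x t ih => simp [sumsl] at ih ⊢; omega

-- B's foldl builds exactly the prefix table prefC
lemma B_prefix (l : List (Int × Int)) : ∀ (acc : List Int) (t : Int),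
    (l.foldl (fun (st : List Int × Int) x =>
      (st.1 ++ [st.2 + (x.2 - x.1)], st.2 + (x.2 - x.1))) (acc, t)).1 = acc ++ prefC l t := by
  induction l with
  | nil => intro acc t; simp [prefC]
  | cons x l ih => intro acc t; simp only [List.foldl_cons, prefC]; rw [ih]; simp

-- correctness of the binary search: least index with C[k] ≥ r, on a monotone table
lemma bs_spec (C : List Int) (r : Int)
    (hm : ∀ i k : Nat, i ≤ k → k < C.length → C.getD i 0 ≤ C.getD k 0) :
    ∀ (n lo hi : Nat), hi - lo ≤ n → lo ≤ hi → hi ≤ C.length →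
    (∀ k, k < lo → C.getD k 0 < r) → (∀ k, hi ≤ k → k < C.length → r ≤ C.getD k 0) →
    (∀ k, k < bsB C r n lo hi → C.getD k 0 < r) ∧ bsB C r n lo hi ≤ C.length ∧
      (bsB C r n lo hi < C.length → r ≤ C.getD (bsB C r n lo hi) 0) := by
  intro n
  induction n with
  | zero =>
    intro lo hi hn hlh hhl hlow hhigh
    have : lo = hi := by omega
    subst this
    simp only [bsB]
    exact ⟨hlow, by omega, fun h => hhigh lo (le_refl _) h⟩
  | succ n ih =>
    intro lo hi hn hlh hhl hlow hhigh
    rw [bsB]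
    by_cases h : lo < hi
    · simp only [h, if_true]
      set mid := (lo + hi) / 2 with hmid
      have hmlo : lo ≤ mid := by omega
      have hmhi : mid < hi := by omega
      by_cases hc : r ≤ C.getD mid 0
      · simp only [hc, if_true]
        apply ih lo mid (by omega) (by omega) (by omega) hlow
        intro k hk hkl
        exact le_trans hc (hm mid k hk hkl)
      · simp only [hc, if_false]
        apply ih (mid + 1) hi (by omega) (by omega) hhl _ hhigh
        intro k hk
        have : C.getD k 0 ≤ C.getD mid 0 := hm k mid (by omega) (by omega)
        omega
    · simp only [h, if_false]
      have : lo = hi := by omega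
      subst this
      exact ⟨hlow, by omega, fun hlt => hhigh lo (le_refl _) hlt⟩

-- the slice assembly at the cutoff index equals the greedy result
lemma build_assemble (l : List (Int × Int)) : ∀ (r : Int) (j : Nat),
    (∀ p ∈ l, p.1 ≤ p.2) → 0 ≤ r → r ≤ sumsl l →
    (∀ k, k < j → (prefC l 0).getD k 0 < r) → j ≤ l.length →
    (j < l.length → r ≤ (prefC l 0).getD j 0) →
    (if j = l.length then l.map (fun x => x.1)
     else (l.map (fun x => x.2)).take j ++
       [(l.map (fun x => x.1)).getD j 0 + (r - (if 0 < j then (prefC l 0).getD (j - 1) 0 else 0))] ++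
       (l.map (fun x => x.1)).drop (j + 1))
    = buildAt l r := by
  induction l with
  | nil =>
    intro r j _ h0 hle _ hj _
    have : j = 0 := by simpa using hj
    subst this
    simp [buildAt]
  | cons x t ih =>
    intro r j hab h0 hle hlow hj hhit
    have hx : x.1 ≤ x.2 := hab x (by simp)
    have htab : ∀ p ∈ t, p.1 ≤ p.2 := fun p hp => hab p (by simp [hp])
    have hC0 : (prefC (x :: t) 0).getD 0 0 = x.2 - x.1 := by
      rw [prefC_getD _ 0 0 (by simp)]; simp [sumsl]
    have hCsucc : ∀ k : Nat, k < t.length →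
        (prefC (x :: t) 0).getD (k + 1) 0 = (x.2 - x.1) + (prefC t 0).getD k 0 := by
      intro k hk
      rw [prefC_getD _ 0 (k + 1) (by simp; omega), prefC_getD t 0 k hk]
      simp [sumsl]
    have hjne : j ≠ (x :: t).length := by
      intro hje
      have hlen : 0 < (x :: t).length := by simp
      have hklt : (x :: t).length - 1 < j := by omega
      have := hlow ((x :: t).length - 1) hklt
      rw [prefC_getD _ 0 _ (by omega)] at this
      have htake : (x :: t).take ((x :: t).length - 1 + 1) = x :: t := by
        apply List.take_of_length_le; omega
      rw [htake] at this
      omega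
    rw [if_neg hjne]
    cases j with
    | zero =>
      have hr0 : r ≤ x.2 - x.1 := by
        have := hhit (by simp)
        rwa [hC0] at this
      simp only [buildAt, if_pos hr0]
      simp
    | succ j' =>
      have hj't : j' < t.length := by simp at hj hjne; omega
      have hCx : x.2 - x.1 < r := by
        have := hlow 0 (by omega)
        rwa [hC0] at this
      simp only [buildAt, if_neg (by omega : ¬ r ≤ x.2 - x.1)]
      set r' := r - (x.2 - x.1) with hr'
      have hprev : (if 0 < j' + 1 then (prefC (x :: t) 0).getD (j' + 1 - 1) 0 else 0)
          = (x.2 - x.1) + (if 0 < j' then (prefC t 0).getD (j' - 1) 0 else 0) := by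
        rw [if_pos (Nat.succ_pos j'), Nat.add_sub_cancel]
        cases j' with
        | zero => rw [if_neg (lt_irrefl 0), hC0]; ring
        | succ k => rw [if_pos (Nat.succ_pos k), Nat.succ_sub_one, hCsucc k (by omega)]
      have hIH := ih r' j' htab (by omega)
        (by have : sumsl (x :: t) = (x.2 - x.1) + sumsl t := by simp [sumsl]
            omega)
        (by intro k hk
            have := hlow (k + 1) (by omega)
            rw [hCsucc k (by omega)] at this
            omega)
        (by omega)
        (by intro hlt
            have := hhit (by simp; omega)
            rw [hCsucc j' hj't] at this
            omega)
      rw [if_neg (by omega : ¬ j' = t.length)] at hIH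
      have helem : r - (if 0 < j' + 1 then (prefC (x :: t) 0).getD (j' + 1 - 1) 0 else 0)
          = r' - (if 0 < j' then (prefC t 0).getD (j' - 1) 0 else 0) := by
        rw [hprev]; omega
      simp only [List.map_cons, List.take_succ_cons, List.getD_cons_succ, List.drop_succ_cons,
        List.cons_append]
      rw [helem, hIH]

-- ===== VERDICT (by name: the statement is the Claim_ definition above) =====
theorem Find_Range_Sum_spec : Claim_equal_Find_Range_Sum := by
  intro Range S _ hPre
  unfold Spec_Find_Range_Sum Find_Range_Sum Find_Range_Sum_alt
  simp only [foldl_sum_pair]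
  by_cases h : (Range.map (fun x => x.1)).sum ≤ S ∧ S ≤ (Range.map (fun x => x.2)).sum
  · have hPre := hPre h
    rw [if_pos h, if_pos h]
    -- A side: the indexed loop is loopA
    have hA := A_loop Range [] [] (S - (Range.map (fun x => x.1)).sum) rfl
    simp only [List.nil_append, List.length_nil, Nat.cast_zero] at hA
    have hA1 := congrArg Prod.fst hA
    simp only at hA1
    rw [hA1]
    -- B side: the foldl builds the prefix table prefC
    rw [B_prefix Range [] 0]
    simp only [List.nil_append]
    set r := S - (Range.map (fun x => x.1)).sum with hrdef
    have hr0 : 0 ≤ r := by omega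
    have hrle : r ≤ sumsl Range := by
      rw [sumsl_eq]; omega
    set C := prefC Range 0 with hC
    have hlen : C.length = Range.length := prefC_length Range 0
    have hmono : ∀ i k : Nat, i ≤ k → k < C.length → C.getD i 0 ≤ C.getD k 0 := by
      intro i k hik hk
      rw [hC, prefC_getD Range 0 i (by omega), prefC_getD Range 0 k (by omega)]
      have := sumsl_take_mono Range hPre (by omega : i + 1 ≤ k + 1)
      omega
    obtain ⟨hlow, hjle, hhit⟩ := bs_spec C r hmono C.length 0 C.length (by omega) (by omega)
      (le_refl _) (by omega) (by omega)
    set j := bsB C r C.length 0 C.length with hj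
    have hasm := build_assemble Range r j hPre hr0 hrle
      (by intro k hk; exact hlow k hk) (by omega) (by intro hlt; exact hhit (by omega))
    rw [← apply_ite some, hasm, loopA_build Range r hPre hr0]
  · rw [if_neg h, if_neg h]
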